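-- pv_equiv track=rewrite | github.com/DeepFoldProtein/patchr | scripts/inpainting/processor/assembly.py | select_best_assembly
-- ===== SOURCE A (Python) =====
-- from typing import Dict, List, Optional, Tuple
--
-- def select_best_assembly(assembly_info: Dict) -> Optional[str]:
--     """Return the ID of the best biological assembly.
--
--     Priority:
--       1. First 'author_and_software_defined_assembly'
--       2. First 'software_defined_assembly'
--       3. First assembly in list
--     """
--     assemblies = assembly_info.get('assemblies', {})
--     if not assemblies:
--         return None
--
--     for aid, info_val in assemblies.items():
--         if 'author_and_software_defined' in info_val.get('details', '').lower():
--             return aid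
--     for aid, info_val in assemblies.items():
--         if 'software_defined' in info_val.get('details', '').lower():
--             return aid
--     return next(iter(assemblies))
-- ===== SOURCE B (Python) =====
-- def select_best_assembly(assembly_info):
--     """Single pass: record the first author match and first software match
--     separately, then pick by priority."""
--     assemblies = assembly_info.get('assemblies', {})
--     if not assemblies:
--         return None
--     author_match = None
--     software_match = None
--     for aid, info_val in assemblies.items():
--         details = info_val.get('details', '').lower()
--         if author_match is None and 'author_and_software_defined' in details:
--             author_match = aid
--         if software_match is None and 'software_defined' in details:
--             software_match = aid
--     if author_match is not None:
--         return author_match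
--     if software_match is not None:
--         return software_match
--     return next(iter(assemblies))
-- ===== Notes on version B (the rewrite author's own statement) =====
-- stated objective: alternative
-- what changed: Replace A's two full scans over the assemblies dict by one single pass that records the first author match and first software match separately and picks by priority afterwards.
import Mathlib
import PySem

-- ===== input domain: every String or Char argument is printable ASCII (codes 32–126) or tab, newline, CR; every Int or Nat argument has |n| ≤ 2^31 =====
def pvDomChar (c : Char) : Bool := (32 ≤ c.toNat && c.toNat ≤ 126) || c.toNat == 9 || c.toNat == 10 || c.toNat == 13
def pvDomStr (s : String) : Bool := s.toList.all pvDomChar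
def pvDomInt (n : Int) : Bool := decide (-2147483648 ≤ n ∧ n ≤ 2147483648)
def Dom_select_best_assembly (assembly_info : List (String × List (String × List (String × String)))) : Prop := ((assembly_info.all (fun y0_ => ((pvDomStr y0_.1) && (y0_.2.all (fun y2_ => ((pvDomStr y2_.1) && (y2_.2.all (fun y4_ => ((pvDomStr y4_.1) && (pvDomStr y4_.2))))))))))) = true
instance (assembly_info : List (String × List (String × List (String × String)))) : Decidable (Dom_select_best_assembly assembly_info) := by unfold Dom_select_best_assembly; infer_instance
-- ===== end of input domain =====

-- B replaces A's two full scans of the assemblies dict with a single pass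
-- recording the first author match and first software match separately and picking by priority afterwards.

-- ===== PORT A =====
-- info_val.get('details', '').lower()  (dict lookup = first match on the assoc list)
def pvDetailsLower (info : List (String × String)) : String :=
  PySem.Str.lower ((info.lookup "details").getD "")

-- 'for aid, info_val in assemblies.items(): if needle in …: return aid'
def pvFirstMatch (needle : String) : List (String × List (String × String)) → Option String
  | [] => none
  | (aid, info) :: rest =>
    if PySem.Str.isIn needle (pvDetailsLower info) then some aid
    else pvFirstMatch needle rest

def select_best_assembly (assembly_info : List (String × List (String × List (String × String)))) : Option String :=
  let assemblies := (assembly_info.lookup "assemblies").getD []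
  if assemblies.isEmpty then none
  else
    match pvFirstMatch "author_and_software_defined" assemblies with
    | some aid => some aid
    | none =>
      match pvFirstMatch "software_defined" assemblies with
      | some aid => some aid
      | none => (assemblies.head?).map (·.1)   -- next(iter(assemblies))

-- ===== PORT B =====
-- B's single loop body: update (author_match, software_match), each set only once.
def pvStep (acc : Option String × Option String)
    (p : String × List (String × String)) : Option String × Option String :=
  let details := PySem.Str.lower ((p.2.lookup "details").getD "")
  let am := if acc.1.isNone && PySem.Str.isIn "author_and_software_defined" details then some p.1 else acc.1
  let sm := if acc.2.isNone && PySem.Str.isIn "software_defined" details then some p.1 else acc.2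
  (am, sm)

def select_best_assembly_alt (assembly_info : List (String × List (String × List (String × String)))) : Option String :=
  let assemblies := (assembly_info.lookup "assemblies").getD []
  if assemblies.isEmpty then none
  else
    let r := assemblies.foldl pvStep (none, none)
    match r.1 with
    | some a => some a
    | none =>
      match r.2 with
      | some s => some s
      | none => (assemblies.head?).map (·.1)

-- ===== PRECONDITION & SPEC =====
def Spec_select_best_assembly (assembly_info : List (String × List (String × List (String × String)))) (out : Option String) : Prop := out = select_best_assembly_alt assembly_info
instance (assembly_info : List (String × List (String × List (String × String)))) (out : Option String) : Decidable (Spec_select_best_assembly assembly_info out) := by unfold Spec_select_best_assembly; infer_instance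

-- ===== CLAIM (what is proved, stated in full; the proofs are below) =====
def Claim_equal_select_best_assembly : Prop := ∀ (assembly_info : List (String × List (String × List (String × String)))), Dom_select_best_assembly assembly_info → Spec_select_best_assembly assembly_info (select_best_assembly assembly_info)

-- ===== LEMMAS AND PROOFS =====

-- B's fold computes exactly A's two first-match scans (unless already set).
theorem foldl_pvStep (l : List (String × List (String × String))) (a s : Option String) :
    l.foldl pvStep (a, s)
      = ((match a with | some x => some x | none => pvFirstMatch "author_and_software_defined" l),
         (match s with | some x => some x | none => pvFirstMatch "software_defined" l)) := by
  induction l generalizing a s with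
  | nil => cases a <;> cases s <;> rfl
  | cons p rest ih =>
    simp only [List.foldl_cons, pvStep, pvFirstMatch, pvDetailsLower]
    cases a <;> cases s <;> split_ifs <;> simp_all [ih]

-- ===== VERDICT (by name: the statement is the Claim_ definition above) =====
theorem select_best_assembly_spec : Claim_equal_select_best_assembly := by
  intro ai _
  show select_best_assembly ai = select_best_assembly_alt ai
  unfold select_best_assembly select_best_assembly_alt
  simp only [foldl_pvStep]
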